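-- pv_equiv track=rewrite | github.com/Liquilab/Bottie | scripts/smart_scout.py | is_game_bet
-- ===== SOURCE A (Python) =====
-- def is_game_bet(slug: str) -> bool:
--     """Only individual matches (slug has date), no futures."""
--     if not slug:
--         return False
--     if any(kw in slug for kw in ["winner", "season", "trophy", "champion", "golden-boot", "mvp"]):
--         return False
--     parts = slug.split("-")
--     for i, p in enumerate(parts):
--         if len(p) == 4 and p.isdigit() and i + 2 < len(parts):
--             if len(parts[i + 1]) == 2 and len(parts[i + 2]) == 2:
--                 return True
--     return False
-- ===== SOURCE B (Python) =====
-- KEYWORDS = ["winner", "season", "trophy", "champion", "golden-boot", "mvp"]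
--
--
-- def _hit(t: str) -> bool:
--     """t starts with a date window: ^[0-9]{4}-xx-xx followed by '-' or end (x = any non-'-')."""
--     if len(t) < 10:
--         return False
--     if not all("0" <= c <= "9" for c in t[:4]):
--         return False
--     if t[4] != "-" or t[7] != "-":
--         return False
--     if "-" in (t[5], t[6], t[8], t[9]):
--         return False
--     return len(t) == 10 or t[10] == "-"
--
--
-- def _scan(t: str) -> bool:
--     """True iff _hit holds at the start of t or just after some '-' in t."""
--     if _hit(t):
--         return True
--     j = t.find("-")
--     if j == -1:
--         return False
--     return _scan(t[j + 1:])
--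
--
-- def is_game_bet(slug: str) -> bool:
--     if not slug:
--         return False
--     if any(kw in slug for kw in KEYWORDS):
--         return False
--     return _scan(slug)
-- ===== Notes on version B (the rewrite author's own statement) =====
-- stated objective: alternative
-- what changed: Replaces the split-on-dash plus indexed scan over the parts list by a direct scanner over the raw string: at the start and just after each dash separator it tests a regex-style window (four digits, dash, two non-dash characters, dash, two non-dash characters, delimited by a dash or the string end), jumping between separators with str.find instead of materialising the parts list.
import Mathlib
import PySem

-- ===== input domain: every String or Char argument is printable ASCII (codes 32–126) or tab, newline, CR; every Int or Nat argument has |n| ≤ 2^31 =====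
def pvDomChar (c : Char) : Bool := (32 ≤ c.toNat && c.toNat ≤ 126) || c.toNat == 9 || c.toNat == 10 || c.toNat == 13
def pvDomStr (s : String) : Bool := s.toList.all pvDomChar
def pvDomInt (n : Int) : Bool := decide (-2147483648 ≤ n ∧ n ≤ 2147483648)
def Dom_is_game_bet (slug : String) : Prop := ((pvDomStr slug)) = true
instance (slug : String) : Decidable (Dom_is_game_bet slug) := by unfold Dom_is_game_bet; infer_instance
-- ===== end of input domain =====

-- B replaces the split-on-dash plus indexed part scan by a direct boundary scanner over the
-- raw string (a regex-style date window delimited by dashes or string ends); alternative, same cost.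

-- ===== PORT A =====
-- the keyword blacklist (identical literal line in A and B)
def pvKeywords : List String := ["winner", "season", "trophy", "champion", "golden-boot", "mvp"]

def kwBlocked (slug : String) : Bool :=
  pvKeywords.any (fun kw => PySem.Str.isIn kw slug)

-- the 'for i, p in enumerate(parts)' loop with its early return
def isGameLoopA (parts : List String) : List (Int × String) → Bool
  | [] => false
  | (i, p) :: rest =>
    if PySem.Str.len p == 4 && PySem.Str.strIsdigit p && decide (i + 2 < (parts.length : Int)) then
      -- parts[i+1] / parts[i+2]: in range under the guard, so the getD default is never used
      if PySem.Str.len (PySem.List.pyGetD parts (i + 1) "") == 2 &&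
         PySem.Str.len (PySem.List.pyGetD parts (i + 2) "") == 2 then true
      else isGameLoopA parts rest
    else isGameLoopA parts rest

def is_game_bet (slug : String) : Bool :=
  if slug == "" then false
  else if kwBlocked slug then false
  else
    -- slug.split("-"): sep "-" is a nonempty literal, so split? is always some
    let parts := (PySem.Str.split? slug "-").getD []
    isGameLoopA parts (PySem.List.enumerate parts 0)

-- ===== PORT B =====
-- _hit(t): t starts with a date window ^[0-9]{4}-xx-xx followed by '-' or end
def hitB (t : List Char) : Bool :=
  if decide (t.length < 10) then false
  else if !((PySem.List.slice t none (some 4)).all (fun c => decide ('0' ≤ c) && decide (c ≤ '9'))) then false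
  else if !(PySem.List.pyGetD t 4 ' ' == '-') || !(PySem.List.pyGetD t 7 ' ' == '-') then false
  else if PySem.List.pyGetD t 5 ' ' == '-' || PySem.List.pyGetD t 6 ' ' == '-' ||
          PySem.List.pyGetD t 8 ' ' == '-' || PySem.List.pyGetD t 9 ' ' == '-' then false
  else decide (t.length = 10) || PySem.List.pyGetD t 10 ' ' == '-'

-- _scan(t): hit at the start of t or just after some '-' in t (recursion jumps to after the first '-')
def scanB (t : List Char) : Bool :=
  if hitB t then true
  else
    let j := PySem.Chars.find t ['-']
    if j == -1 then false
    else scanB (PySem.List.slice t (some (j + 1)) none)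
termination_by t.length
decreasing_by
  rename_i _ hne
  have h0 : 0 ≤ PySem.Chars.find t ['-'] := by
    have := PySem.Chars.neg_one_le_find t ['-']
    simp only [beq_iff_eq] at hne
    omega
  have hsp := (PySem.Chars.find_spec h0).1
  have hlt : (PySem.Chars.find t ['-']).toNat < t.length := by
    rcases hsp with ⟨u, hu⟩
    have : (List.drop (PySem.Chars.find t ['-']).toNat t).length = 1 + u.length := by
      rw [← hu]; simp; omega
    have h2 : (List.drop (PySem.Chars.find t ['-']).toNat t).length = t.length - (PySem.Chars.find t ['-']).toNat :=
      List.length_drop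
    omega
  rw [PySem.List.slice_from t (by omega)]
  simp only [List.length_drop]
  omega

def is_game_bet_alt (slug : String) : Bool :=
  if slug == "" then false
  else if kwBlocked slug then false
  else scanB slug.toList

-- ===== PRECONDITION & SPEC =====
def Spec_is_game_bet (slug : String) (out : Bool) : Prop := out = is_game_bet_alt slug
instance (slug : String) (out : Bool) : Decidable (Spec_is_game_bet slug out) := by unfold Spec_is_game_bet; infer_instance

-- ===== CLAIM (what is proved, stated in full; the proofs are below) =====
def Claim_equal_is_game_bet : Prop := ∀ (slug : String), Dom_is_game_bet slug → Spec_is_game_bet slug (is_game_bet slug)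

-- ===== LEMMAS AND PROOFS =====

-- splitting on '-' as a plain structural recursion
def dashSplit : List Char → List (List Char)
  | [] => [[]]
  | c :: t =>
    if c = '-' then [] :: dashSplit t
    else
      match dashSplit t with
      | h :: tl => (c :: h) :: tl
      | [] => [[c]]

def joinDash : List (List Char) → List Char
  | [] => []
  | [p] => p
  | p :: q :: rest => p ++ '-' :: joinDash (q :: rest)

def consHead (x : List Char) : List (List Char) → List (List Char)
  | [] => [x]
  | h :: t => (x ++ h) :: t

lemma dashSplit_ne_nil (t : List Char) : dashSplit t ≠ [] := by
  induction t with
  | nil => simp [dashSplit]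
  | cons c t ih =>
    simp only [dashSplit]
    split
    · simp
    · rcases hds : dashSplit t with _ | ⟨h2, tl⟩ <;> simp

lemma dashSplit_dashfree (t : List Char) : ∀ p ∈ dashSplit t, ('-' : Char) ∉ p := by
  induction t with
  | nil => simp [dashSplit]
  | cons c t ih =>
    simp only [dashSplit]
    split
    · intro p hp
      rw [List.mem_cons] at hp
      rcases hp with hp | hp
      · simp [hp]
      · exact ih p hp
    · rename_i hc
      rcases hds : dashSplit t with _ | ⟨h2, tl⟩
      · intro p hp
        rw [List.mem_cons] at hp
        rcases hp with hp | hp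
        · simp [hp, Ne.symm hc]
        · simp at hp
      · intro p hp
        rw [List.mem_cons] at hp
        rcases hp with hp | hp
        · subst hp
          intro hm
          rw [List.mem_cons] at hm
          rcases hm with hm | hm
          · exact hc hm.symm
          · exact ih h2 (by rw [hds]; exact List.mem_cons_self) hm
        · exact ih p (by rw [hds]; exact List.mem_cons_of_mem _ hp)

lemma joinDash_cons (p : List Char) (rest : List (List Char)) (h : rest ≠ []) :
    joinDash (p :: rest) = p ++ '-' :: joinDash rest := by
  rcases rest with _ | ⟨q, rest⟩
  · exact absurd rfl h
  · rfl

lemma joinDash_dashSplit (t : List Char) : joinDash (dashSplit t) = t := by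
  induction t with
  | nil => simp [dashSplit, joinDash]
  | cons c t ih =>
    simp only [dashSplit]
    split
    · rename_i hc
      rw [joinDash_cons _ _ (dashSplit_ne_nil t), ih, hc]
      simp
    · rcases hds : dashSplit t with _ | ⟨h2, tl⟩
      · exact absurd hds (dashSplit_ne_nil t)
      · rw [hds] at ih
        rcases tl with _ | ⟨q, tl⟩
        · simpa [joinDash] using congrArg (c :: ·) ih
        · rw [joinDash_cons h2 (q :: tl) (by simp)] at ih
          rw [joinDash_cons (c :: h2) (q :: tl) (by simp)]
          simpa using congrArg (c :: ·) ih

lemma go_spec (l : List Char) : ∀ (fuel : Nat) (cur : List Char) (acc : List (List Char)),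
    l.length ≤ fuel →
    PySem.Chars.splitOn.go ['-'] fuel l cur acc = acc.reverse ++ consHead cur.reverse (dashSplit l) := by
  induction l with
  | nil =>
    intro fuel cur acc _
    rw [PySem.Chars.splitOn.go.eq_def]
    rcases fuel with _ | f <;> simp [dashSplit, consHead]
  | cons c rest ih =>
    intro fuel cur acc hf
    rcases fuel with _ | f
    · simp at hf
    · rw [PySem.Chars.splitOn.go.eq_def]
      simp only []
      by_cases hc : c = '-'
      · subst hc
        have hpref : List.isPrefixOf ['-'] ('-' :: rest) = true := by
          simp [List.isPrefixOf]
        simp only [hpref, if_pos]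
        have hdrop : List.drop (['-'] : List Char).length ('-' :: rest) = rest := by simp
        rw [hdrop, ih f [] (List.reverse cur :: acc) (by simp at hf ⊢; omega)]
        rcases hds : dashSplit rest with _ | ⟨h, tl⟩
        · exact absurd hds (dashSplit_ne_nil rest)
        · simp [dashSplit, hds, consHead]
      · have hpref : List.isPrefixOf ['-'] (c :: rest) = false := by
          simp [List.isPrefixOf]
          exact fun h => absurd h.symm hc
        simp only [hpref]
        simp only [Bool.false_eq_true, if_false]
        rw [ih f (c :: cur) acc (by simp at hf ⊢; omega)]
        rcases hds : dashSplit rest with _ | ⟨h, tl⟩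
        · exact absurd hds (dashSplit_ne_nil rest)
        · simp [dashSplit, hds, consHead, hc]

lemma splitOn_dash (t : List Char) : PySem.Chars.splitOn t ['-'] = dashSplit t := by
  rw [PySem.Chars.splitOn.eq_def, go_spec t (t.length + 1) [] [] (by omega)]
  rcases hds : dashSplit t with _ | ⟨h, tl⟩
  · exact absurd hds (dashSplit_ne_nil t)
  · simp [consHead]

-- pattern view of hitB
def hitView : List Char → Bool
  | a :: b :: c :: d :: e :: f :: g :: h :: i :: j :: rest =>
      PySem.Chars.isdigit a && PySem.Chars.isdigit b && PySem.Chars.isdigit c && PySem.Chars.isdigit d &&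
      e == '-' && !(f == '-') && !(g == '-') && h == '-' && !(i == '-') && !(j == '-') &&
      (match rest with | [] => true | k :: _ => k == '-')
  | _ => false

lemma hitB_eq (t : List Char) : hitB t = hitView t := by
  rcases t with _|⟨a,t⟩; · simp [hitB, hitView]
  rcases t with _|⟨b,t⟩; · simp [hitB, hitView]
  rcases t with _|⟨c,t⟩; · simp [hitB, hitView]
  rcases t with _|⟨d,t⟩; · simp [hitB, hitView]
  rcases t with _|⟨e,t⟩; · simp [hitB, hitView]
  rcases t with _|⟨f,t⟩; · simp [hitB, hitView]
  rcases t with _|⟨g,t⟩; · simp [hitB, hitView]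
  rcases t with _|⟨h,t⟩; · simp [hitB, hitView]
  rcases t with _|⟨i,t⟩; · simp [hitB, hitView]
  rcases t with _|⟨j,rest⟩; · simp [hitB, hitView]
  have g4 : PySem.List.pyGetD (a::b::c::d::e::f::g::h::i::j::rest) 4 ' ' = e := by
    simp only [PySem.List.pyGetD, PySem.List.pyGet?, PySem.List.pyIdx?, List.length_cons]
    rw [if_pos (by omega), if_pos (by push_cast; omega)]; simp
  have g5 : PySem.List.pyGetD (a::b::c::d::e::f::g::h::i::j::rest) 5 ' ' = f := by
    simp only [PySem.List.pyGetD, PySem.List.pyGet?, PySem.List.pyIdx?, List.length_cons]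
    rw [if_pos (by omega), if_pos (by push_cast; omega)]; simp
  have g6 : PySem.List.pyGetD (a::b::c::d::e::f::g::h::i::j::rest) 6 ' ' = g := by
    simp only [PySem.List.pyGetD, PySem.List.pyGet?, PySem.List.pyIdx?, List.length_cons]
    rw [if_pos (by omega), if_pos (by push_cast; omega)]; simp
  have g7 : PySem.List.pyGetD (a::b::c::d::e::f::g::h::i::j::rest) 7 ' ' = h := by
    simp only [PySem.List.pyGetD, PySem.List.pyGet?, PySem.List.pyIdx?, List.length_cons]
    rw [if_pos (by omega), if_pos (by push_cast; omega)]; simp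
  have g8 : PySem.List.pyGetD (a::b::c::d::e::f::g::h::i::j::rest) 8 ' ' = i := by
    simp only [PySem.List.pyGetD, PySem.List.pyGet?, PySem.List.pyIdx?, List.length_cons]
    rw [if_pos (by omega), if_pos (by push_cast; omega)]; simp
  have g9 : PySem.List.pyGetD (a::b::c::d::e::f::g::h::i::j::rest) 9 ' ' = j := by
    simp only [PySem.List.pyGetD, PySem.List.pyGet?, PySem.List.pyIdx?, List.length_cons]
    rw [if_pos (by omega), if_pos (by push_cast; omega)]; simp
  have gsl : PySem.List.slice (a::b::c::d::e::f::g::h::i::j::rest) none (some 4) = [a,b,c,d] := by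
    rw [PySem.List.slice_to _ (by norm_num)]; simp
  rcases rest with _|⟨k, rest'⟩
  · simp [hitB, hitView, gsl, g4, g5, g6, g7, g8, g9, PySem.Chars.isdigit]
    rw [Bool.eq_iff_iff]
    simp [not_lt]
    tauto
  · have g10 : PySem.List.pyGetD (a::b::c::d::e::f::g::h::i::j::k::rest') 10 ' ' = k := by
      simp only [PySem.List.pyGetD, PySem.List.pyGet?, PySem.List.pyIdx?, List.length_cons]
      rw [if_pos (by omega), if_pos (by push_cast; omega)]; simp
    simp [hitB, hitView, gsl, g4, g5, g6, g7, g8, g9, g10, PySem.Chars.isdigit,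
          show ¬(rest'.length + 1 + 1 + 1 + 1 + 1 + 1 + 1 + 1 + 1 + 1 + 1 < 10) from by omega]
    rw [Bool.eq_iff_iff]
    simp [not_lt]
    tauto


-- the window test over the parts list (A's condition, seen structurally)
def checkFirst : List (List Char) → Bool
  | p :: q :: r :: _ =>
      decide (p.length = 4) && PySem.Chars.strIsdigit p && decide (q.length = 2) && decide (r.length = 2)
  | _ => false

def winA : List (List Char) → Bool
  | [] => false
  | p :: rest => checkFirst (p :: rest) || winA rest

def scanStep : List Char → Bool
  | [] => false
  | c :: u => if c = '-' then hitView u || scanStep u else scanStep u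

lemma scanStep_dashfree (t : List Char) (h : ('-' : Char) ∉ t) : scanStep t = false := by
  induction t with
  | nil => rfl
  | cons c u ih =>
    have hc : ¬(c = '-') := fun hc => h (by simp [hc])
    simp only [scanStep, if_neg hc]
    exact ih (fun hm => h (List.mem_cons_of_mem _ hm))

lemma hitView_dashfree (t : List Char) (h : ('-' : Char) ∉ t) : hitView t = false := by
  rcases t with _|⟨a,t⟩; · rfl
  rcases t with _|⟨b,t⟩; · rfl
  rcases t with _|⟨c,t⟩; · rfl
  rcases t with _|⟨d,t⟩; · rfl
  rcases t with _|⟨e,t⟩; · rfl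
  rcases t with _|⟨f,t⟩; · rfl
  rcases t with _|⟨g,t⟩; · rfl
  rcases t with _|⟨h',t⟩; · rfl
  rcases t with _|⟨i,t⟩; · rfl
  rcases t with _|⟨j,rest⟩; · rfl
  have he : ¬(e = '-') := fun heq => h (by simp [heq])
  simp [hitView, he]

lemma scanStep_append (a u : List Char) (h : ('-' : Char) ∉ a) :
    scanStep (a ++ u) = scanStep u := by
  induction a with
  | nil => rfl
  | cons c a' ih =>
    have hc : ¬(c = '-') := fun hc => h (by simp [hc])
    simp only [List.cons_append, scanStep, if_neg hc]
    exact ih (fun hm => h (List.mem_cons_of_mem _ hm))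

lemma scanB_eq (t : List Char) : scanB t = (hitView t || scanStep t) := by
  induction t using scanB.induct with
  | case1 t hhit =>
    rw [scanB, if_pos hhit, hitB_eq] at *
    simp [hhit]
  | case2 t hhit j hj =>
    have hfind : PySem.Chars.find t ['-'] = -1 := by simpa using hj
    have hnin : ('-' : Char) ∉ t := by
      intro hm
      rcases List.append_of_mem hm with ⟨p, q, hpq⟩
      have : (['-'] : List Char) <:+: t := ⟨p, q, by simp [hpq]⟩
      exact (PySem.Chars.find_eq_neg_one_iff t ['-']).mp hfind this
    rw [scanB, if_neg hhit]
    simp only [hfind]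
    rw [scanStep_dashfree t hnin, hitView_dashfree t hnin]
    simp
  | case3 t hhit j hj ih =>
    rw [scanB, if_neg hhit]
    have hj' : (PySem.Chars.find t ['-'] == -1) = false := by
      simpa using hj
    simp only [hj', Bool.false_eq_true, if_false]
    have h0 : 0 ≤ PySem.Chars.find t ['-'] := by
      have := PySem.Chars.neg_one_le_find t ['-']
      simp only [beq_iff_eq] at hj
      omega
    have hsp := PySem.Chars.find_spec h0
    set n : Nat := (PySem.Chars.find t ['-']).toNat with hn
    have hdropn : List.drop n t = '-' :: List.drop (n + 1) t := by
      rcases hsp.1 with ⟨v, hv⟩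
      have hv' : List.drop n t = '-' :: v := by simpa using hv.symm
      have : List.drop (n + 1) t = v := by
        have := congrArg List.tail hv'
        simpa [List.tail_drop] using this
      rw [hv', this]
    have hslice : PySem.List.slice t (some (PySem.Chars.find t ['-'] + 1)) none
        = List.drop (n + 1) t := by
      rw [PySem.List.slice_from t (by omega)]
      congr 1
      omega
    have hj2 : j = PySem.Chars.find t ['-'] := rfl
    simp only [hj2] at ih
    rw [hslice] at ih
    rw [hslice, ih]
    have htake : ('-' : Char) ∉ List.take n t := by
      intro hm
      rcases List.mem_take_iff_getElem.mp hm with ⟨i, hi, hgi⟩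
      have hilen : i < t.length := lt_of_lt_of_le (lt_min_iff.mp hi).2 (by
        exact Nat.le_of_lt_succ (Nat.lt_succ_of_le (le_refl _)))
      have : (['-'] : List Char) <+: List.drop i t := by
        rw [← List.getElem_cons_drop (as := t) (h := hilen)]
        exact ⟨List.drop (i + 1) t, by simp [hgi]⟩
      exact hsp.2 i (lt_min_iff.mp hi).1 this
    have hdecomp : t = List.take n t ++ '-' :: List.drop (n + 1) t := by
      conv_lhs => rw [← List.take_append_drop n t]
      rw [hdropn]
    have hviewt : hitView t = false := by rw [← hitB_eq]; simpa using hhit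
    rw [hviewt]
    have hstep : scanStep t = (hitView (List.drop (n + 1) t) || scanStep (List.drop (n + 1) t)) := by
      conv_lhs => rw [hdecomp]
      rw [scanStep_append _ _ htake]
      simp [scanStep]
    rw [hstep]
    simp

lemma hitView_char (t : List Char) :
    hitView t = (decide (10 ≤ t.length) &&
      PySem.Chars.isdigit (t.getD 0 ' ') && PySem.Chars.isdigit (t.getD 1 ' ') &&
      PySem.Chars.isdigit (t.getD 2 ' ') && PySem.Chars.isdigit (t.getD 3 ' ') &&
      (t.getD 4 ' ' == '-') && !(t.getD 5 ' ' == '-') && !(t.getD 6 ' ' == '-') &&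
      (t.getD 7 ' ' == '-') && !(t.getD 8 ' ' == '-') && !(t.getD 9 ' ' == '-') &&
      (decide (t.length = 10) || (t.getD 10 ' ' == '-'))) := by
  rcases t with _|⟨a,t⟩; · rfl
  rcases t with _|⟨b,t⟩; · rfl
  rcases t with _|⟨c,t⟩; · rfl
  rcases t with _|⟨d,t⟩; · rfl
  rcases t with _|⟨e,t⟩; · rfl
  rcases t with _|⟨f,t⟩; · rfl
  rcases t with _|⟨g,t⟩; · rfl
  rcases t with _|⟨h,t⟩; · rfl
  rcases t with _|⟨i,t⟩; · rfl
  rcases t with _|⟨j,rest⟩; · rfl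
  rcases rest with _|⟨k, rest'⟩
  · simp [hitView]
  · simp [hitView, show ¬(rest'.length + 1 + 1 + 1 + 1 + 1 + 1 + 1 + 1 + 1 + 1 + 1 = 10) from by omega]

lemma checkFirst_short (p : List Char) (rest : List (List Char)) (h : p.length ≠ 4) :
    checkFirst (p :: rest) = false := by
  rcases rest with _|⟨q, rest⟩; · rfl
  rcases rest with _|⟨r, rest⟩; · rfl
  simp [checkFirst, h]

lemma checkFirst_q (p q : List Char) (rest : List (List Char)) (h : q.length ≠ 2) :
    checkFirst (p :: q :: rest) = false := by
  rcases rest with _|⟨r, rest⟩; · rfl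
  simp [checkFirst, h]

lemma checkFirst_r (p q r : List Char) (rest : List (List Char)) (h : r.length ≠ 2) :
    checkFirst (p :: q :: r :: rest) = false := by
  simp [checkFirst, h]

lemma hitView_join (parts : List (List Char)) (hne : parts ≠ [])
    (hdf : ∀ p ∈ parts, ('-' : Char) ∉ p) :
    hitView (joinDash parts) = checkFirst parts := by
  rcases parts with _ | ⟨p, rest⟩
  · exact absurd rfl hne
  rcases rest with _ | ⟨q, rest'⟩
  · -- single part, dash-free
    rw [show joinDash [p] = p from rfl, hitView_dashfree p (hdf p (by simp))]
    rcases p with _ | ⟨x, p'⟩ <;> rfl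
  -- joinDash (p :: q :: rest') = p ++ '-' :: joinDash (q :: rest')
  have hjd : joinDash (p :: q :: rest') = p ++ '-' :: joinDash (q :: rest') := rfl
  have hpd : ('-' : Char) ∉ p := hdf p (by simp)
  have hqd : ('-' : Char) ∉ q := hdf q (by simp)
  rw [hjd]
  rcases p with _|⟨a,p⟩
  · rw [hitView_char, checkFirst_short _ _ (by simp)]
    simp [PySem.Chars.isdigit]
  rcases p with _|⟨b,p⟩
  · rw [hitView_char, checkFirst_short _ _ (by simp)]
    simp [PySem.Chars.isdigit]
  rcases p with _|⟨c,p⟩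
  · rw [hitView_char, checkFirst_short _ _ (by simp)]
    simp [PySem.Chars.isdigit]
  rcases p with _|⟨d,p⟩
  · rw [hitView_char, checkFirst_short _ _ (by simp)]
    simp [PySem.Chars.isdigit]
  rcases p with _|⟨e,p⟩
  · -- p = [a,b,c,d]: the window starts as a,b,c,d,'-',J with J = joinDash (q :: rest')
    rcases q with _|⟨x,q⟩
    · rcases rest' with _|⟨r, rest''⟩
      · rw [hitView_char]; simp [joinDash, checkFirst]
      · rw [hitView_char]; simp [joinDash, checkFirst]
    rcases q with _|⟨y,q⟩
    · rcases rest' with _|⟨r, rest''⟩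
      · rw [hitView_char]; simp [joinDash, checkFirst]
      · rw [hitView_char]; simp [joinDash, checkFirst]
    rcases q with _|⟨z,q⟩
    case cons.cons.cons =>
      -- q has ≥ 3 chars: position 7 is the non-dash char z of q
      have hz : ¬(z = '-') := fun hc => hqd (by simp [hc])
      rw [hitView_char, checkFirst_q _ _ _ (by simp only [List.length_cons]; omega)]
      rcases rest' with _|⟨r, rest''⟩
      · simp [joinDash, hz]
      · simp [joinDash, hz]
    -- q = [x, y]
    have hx : ¬(x = '-') := fun hc => hqd (by simp [hc])
    have hy : ¬(y = '-') := fun hc => hqd (by simp [hc])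
    rcases rest' with _|⟨r, rest''⟩
    · rw [hitView_char]; simp [joinDash, checkFirst]
    have hrd : ('-' : Char) ∉ r := hdf r (by simp)
    rcases r with _|⟨u,r⟩
    · rcases rest'' with _|⟨w, rest3⟩
      · rw [hitView_char]; simp [joinDash, checkFirst]
      · rw [hitView_char]; simp [joinDash, checkFirst]
    rcases r with _|⟨v,r⟩
    · rcases rest'' with _|⟨w, rest3⟩
      · rw [hitView_char]; simp [joinDash, checkFirst]
      · rw [hitView_char]; simp [joinDash, checkFirst]
    rcases r with _|⟨w,r⟩
    case cons.cons.cons =>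
      have hw : ¬(w = '-') := fun hc => hrd (by simp [hc])
      rw [hitView_char, checkFirst_r _ _ _ _ (by simp only [List.length_cons]; omega)]
      rcases rest'' with _|⟨s', rest3⟩
      · simp [joinDash, hw, hx, hy]
      · simp [joinDash, hw, hx, hy]
    -- r = [u, v]: the true case
    have hu : ¬(u = '-') := fun hc => hrd (by simp [hc])
    have hv : ¬(v = '-') := fun hc => hrd (by simp [hc])
    rcases rest'' with _|⟨s', rest3⟩
    · rw [hitView_char]
      simp [joinDash, checkFirst, PySem.Chars.strIsdigit, PySem.Chars.isdigit]
      rw [Bool.eq_iff_iff]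
      simp [hx, hy, hu, hv]
      tauto
    · rw [hitView_char]
      simp [joinDash, checkFirst, PySem.Chars.strIsdigit, PySem.Chars.isdigit]
      rw [Bool.eq_iff_iff]
      simp [hx, hy, hu, hv]
      tauto
  · -- p has ≥ 5 chars: position 4 of the join is a non-dash char of p
    have he : ¬(e = '-') := fun hc => hpd (by simp [hc])
    rw [hitView_char, checkFirst_short _ _ (by simp only [List.length_cons]; omega)]
    simp [he]


lemma scan_join (parts : List (List Char)) (hne : parts ≠ [])
    (hdf : ∀ p ∈ parts, ('-' : Char) ∉ p) :
    (hitView (joinDash parts) || scanStep (joinDash parts)) = winA parts := by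
  induction parts with
  | nil => exact absurd rfl hne
  | cons p rest ih =>
    rcases rest with _ | ⟨q, rest'⟩
    · have hpd : ('-' : Char) ∉ p := hdf p (by simp)
      rw [show joinDash [p] = p from rfl, hitView_dashfree p hpd, scanStep_dashfree p hpd]
      rcases p with _ | ⟨x, p'⟩ <;> rfl
    · have hpd : ('-' : Char) ∉ p := hdf p (by simp)
      have hjd : joinDash (p :: q :: rest') = p ++ '-' :: joinDash (q :: rest') := rfl
      have hstep : scanStep (joinDash (p :: q :: rest'))
          = (hitView (joinDash (q :: rest')) || scanStep (joinDash (q :: rest'))) := by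
        rw [hjd, scanStep_append _ _ hpd]
        simp [scanStep]
      rw [hstep, hitView_join (p :: q :: rest') (by simp) hdf,
          ih (by simp) (fun r hr => hdf r (List.mem_cons_of_mem _ hr))]
      simp [winA]

lemma loopA_cons (parts : List String) (i : Int) (P : String) (rest : List (Int × String)) :
    isGameLoopA parts ((i, P) :: rest) =
      (((PySem.Str.len P == 4 && PySem.Str.strIsdigit P && decide (i + 2 < (parts.length : Int))) &&
        (PySem.Str.len (PySem.List.pyGetD parts (i + 1) "") == 2 &&
         PySem.Str.len (PySem.List.pyGetD parts (i + 2) "") == 2)) || isGameLoopA parts rest) := by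
  simp only [isGameLoopA]
  split_ifs with h1 h2
  · rw [h1, h2]; simp
  · rw [Bool.not_eq_true] at h2; rw [h1, h2]; simp
  · rw [Bool.not_eq_true] at h1; rw [h1]; simp

lemma loopA_eq (suf pre : List (List Char)) :
    isGameLoopA ((pre ++ suf).map String.ofList)
        (PySem.List.enumerate (suf.map String.ofList) pre.length) = winA suf := by
  induction suf generalizing pre with
  | nil => simp [isGameLoopA, winA]
  | cons p suftail ih =>
    rw [List.map_cons, PySem.List.enumerate_cons, loopA_cons]
    have hrec : isGameLoopA ((pre ++ p :: suftail).map String.ofList)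
        (PySem.List.enumerate (suftail.map String.ofList) ((pre.length : Int) + 1))
        = winA suftail := by
      have h1 : pre ++ p :: suftail = (pre ++ [p]) ++ suftail := by simp
      have h2 : ((pre.length : Int) + 1) = (((pre ++ [p]).length : Nat) : Int) := by
        simp
      rw [h1, h2]
      exact ih (pre ++ [p])
    rw [hrec]
    have hlen : ((pre ++ p :: suftail).map String.ofList).length = pre.length + 1 + suftail.length := by
      simp; omega
    rcases suftail with _ | ⟨q, suftail2⟩
    · -- no parts[i+1]: the i+2 < len guard is false
      have : (decide ((pre.length : Int) + 2 < (((pre ++ [p]).map String.ofList).length : Int))) = false := by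
        simp
      simp only [] at this ⊢
      rw [Bool.eq_iff_iff]
      simp [winA, checkFirst, PySem.Str.len_eq]
    rcases suftail2 with _ | ⟨r, suftail3⟩
    · have hl : (((pre ++ [p, q]).map String.ofList).length : Int) = (pre.length : Int) + 2 := by
        simp
      rw [Bool.eq_iff_iff]
      simp [winA, checkFirst, PySem.Str.len_eq]
    · -- at least three parts from position i: the guard holds and parts[i+1], parts[i+2] are q, r
      have hg1 : PySem.List.pyGetD ((pre ++ p :: q :: r :: suftail3).map String.ofList)
          ((pre.length : Int) + 1) "" = String.ofList q := by
        rw [show ((pre.length : Int) + 1) = ((pre.length + 1 : Nat) : Int) by push_cast; ring,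
            PySem.List.pyGetD_natCast]
        rw [List.getD_eq_getElem?_getD, List.map_append, List.getElem?_append_right (by simp)]
        simp
      have hg2 : PySem.List.pyGetD ((pre ++ p :: q :: r :: suftail3).map String.ofList)
          ((pre.length : Int) + 2) "" = String.ofList r := by
        rw [show ((pre.length : Int) + 2) = ((pre.length + 2 : Nat) : Int) by push_cast; ring,
            PySem.List.pyGetD_natCast]
        rw [List.getD_eq_getElem?_getD, List.map_append, List.getElem?_append_right (by simp)]
        simp
      rw [hg1, hg2, Bool.eq_iff_iff]
      simp [winA, checkFirst, PySem.Str.len_eq, PySem.Str.strIsdigit_eq]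
      constructor
      · rintro (⟨⟨⟨h4, hd⟩, _⟩, h2a, h2b⟩ | h)
        · exact Or.inl ⟨⟨⟨by omega, hd⟩, by omega⟩, by omega⟩
        · exact Or.inr h
      · rintro (⟨⟨⟨h4, hd⟩, h2a⟩, h2b⟩ | h)
        · exact Or.inl ⟨⟨⟨by omega, hd⟩, by omega⟩, by omega, by omega⟩
        · exact Or.inr h

-- ===== VERDICT (by name: the statement is the Claim_ definition above) =====
theorem is_game_bet_spec : Claim_equal_is_game_bet := by
  intro slug _
  unfold Spec_is_game_bet is_game_bet is_game_bet_alt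
  by_cases h0 : (slug == "") = true
  · simp only [h0, if_pos]
  rw [Bool.not_eq_true] at h0
  simp only [h0, Bool.false_eq_true, if_false]
  by_cases hkw : kwBlocked slug = true
  · simp only [hkw, if_pos]
  rw [Bool.not_eq_true] at hkw
  simp only [hkw, Bool.false_eq_true, if_false]
  have hsplit : (PySem.Str.split? slug "-").getD [] = (dashSplit slug.toList).map String.ofList := by
    simp [PySem.Str.split?, PySem.Chars.split?, splitOn_dash]
  rw [hsplit]
  have hA := loopA_eq (dashSplit slug.toList) []
  simp only [List.nil_append, List.length_nil, Nat.cast_zero] at hA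
  rw [hA, scanB_eq]
  have hB := scan_join (dashSplit slug.toList) (dashSplit_ne_nil _) (dashSplit_dashfree _)
  rw [joinDash_dashSplit] at hB
  rw [hB]
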